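-- pv_equiv track=rewrite | github.com/luornor/A2SV | contest_21/F_Mark_the_Dust_Sweeper.py | solve
-- ===== SOURCE A (Python) =====
-- def solve(a,n):
--     ans = 0
--     not_zero = False
--     for i in range(n-1):
--         if a[i]!=0:
--             not_zero = True
--             ans+=a[i]
--         elif not_zero:
--             ans+=1
--
--     return ans
-- ===== SOURCE B (Python) =====
-- def solve(a, n):
--     prefix = a[:max(n - 1, 0)]
--     while prefix and prefix[0] == 0:
--         prefix = prefix[1:]
--     if not prefix:
--         return 0
--     rest = prefix[1:]
--     return prefix[0] + sum(rest) + rest.count(0)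
-- ===== Notes on version B (the rewrite author's own statement) =====
-- stated objective: simpler
-- what changed: Replaces A's flag-driven accumulator loop with a decomposition: take the prefix a[:n-1], strip its leading zeros, then return head + sum(rest) + rest.count(0).
-- outside the precondition, e.g. on solve([1], 3): A raises IndexError, B returns 1
import Mathlib
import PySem

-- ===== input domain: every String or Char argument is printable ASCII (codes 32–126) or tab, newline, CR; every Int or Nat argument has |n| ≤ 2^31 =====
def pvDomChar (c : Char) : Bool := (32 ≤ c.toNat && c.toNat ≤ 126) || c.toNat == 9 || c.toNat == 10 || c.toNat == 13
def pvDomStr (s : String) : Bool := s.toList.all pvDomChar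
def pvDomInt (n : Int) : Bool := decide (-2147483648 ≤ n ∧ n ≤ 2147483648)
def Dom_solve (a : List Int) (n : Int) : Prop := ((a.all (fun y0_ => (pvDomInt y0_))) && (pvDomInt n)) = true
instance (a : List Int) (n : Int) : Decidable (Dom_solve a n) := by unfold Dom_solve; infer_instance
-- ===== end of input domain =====

-- B replaces A's flag-driven single accumulation by: strip leading zeros of a[:n-1],
-- then answer = head + sum(rest) + count of zeros in rest (objective: simpler decomposition).

-- ===== PORT A =====
-- loop body of A; the Option threads Python's IndexError (none) through the fold
def solveStep (a : List Int) (st : Option (Int × Bool)) (i : Int) : Option (Int × Bool) :=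
  match st with
  | none => none
  | some (ans, nz) =>
    match PySem.List.pyGet? a i with
    | none => none
    | some x => if x ≠ 0 then some (ans + x, true) else if nz then some (ans + 1, nz) else some (ans, nz)

def solve (a : List Int) (n : Int) : Int :=
  match (PySem.List.pyRange 0 (n-1) 1).foldl (solveStep a) (some (0, false)) with
  | some (ans, _) => ans
  | none => 0   -- unreachable under Pre_solve (Python raises IndexError there)

-- ===== PORT B =====
-- port of Source B's while-loop that pops leading zeros
def stripZeros : List Int → List Int
  | [] => []
  | x :: xs => if x = 0 then stripZeros xs else x :: xs

def solve_alt (a : List Int) (n : Int) : Int :=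
  let pre := PySem.List.slice a none (some (max (n - 1) 0))
  match stripZeros pre with
  | [] => 0
  | x :: rest => x + rest.sum + rest.count 0

-- ===== PRECONDITION & SPEC =====
-- A indexes a[i] for i in range(n-1); it raises IndexError iff n-1 > len(a).
def Pre_solve (a : List Int) (n : Int) : Prop := n - 1 ≤ (a.length : Int)
instance (a : List Int) (n : Int) : Decidable (Pre_solve a n) := by unfold Pre_solve; infer_instance

def pvWitness_solve : List Int × Int := ([1, 0, 2, 0], 4)

def Spec_solve (a : List Int) (n : Int) (out : Int) : Prop := out = solve_alt a n
instance (a : List Int) (n : Int) (out : Int) : Decidable (Spec_solve a n out) := by unfold Spec_solve; infer_instance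

-- ===== CLAIM (what is proved, stated in full; the proofs are below) =====
def Claim_equal_solve : Prop := ∀ (a : List Int) (n : Int), Dom_solve a n → Pre_solve a n → Spec_solve a n (solve a n)

-- ===== LEMMAS AND PROOFS =====

-- pure version of A's loop body, acting on element values
def gstep (st : Int × Bool) (x : Int) : Int × Bool :=
  if x ≠ 0 then (st.1 + x, true) else if st.2 then (st.1 + 1, st.2) else st

-- B's value on the prefix list
def bval (l : List Int) : Int :=
  match stripZeros l with
  | [] => 0
  | x :: rest => x + rest.sum + rest.count 0

-- A's indexed fold over range(m) equals the pure fold over the first m elements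
theorem solve_fold_take (a : List Int) (m : Nat) (h : m ≤ a.length) (st : Int × Bool) :
    (PySem.List.pyRange 0 (m : Int) 1).foldl (solveStep a) (some st)
      = some ((a.take m).foldl gstep st) := by
  induction m generalizing st with
  | zero => simp
  | succ k ih =>
    have hk : k < a.length := h
    have hsplit : PySem.List.pyRange 0 ((k : Int) + 1) 1
        = PySem.List.pyRange 0 (k : Int) 1 ++ [(k : Int)] :=
      PySem.List.pyRange_one_succ_right (by positivity)
    have htake : a.take (k + 1) = a.take k ++ [a[k]] := by
      rw [List.take_add_one, List.getElem?_eq_getElem hk]; rfl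
    rw [show ((k + 1 : Nat) : Int) = (k : Int) + 1 by push_cast; ring, hsplit,
        List.foldl_append, ih (by omega), htake, List.foldl_append]
    simp only [List.foldl_cons, List.foldl_nil, solveStep, PySem.List.pyGet?_natCast,
      List.getElem?_eq_getElem hk]
    by_cases hx : a[k] = 0 <;> simp [gstep, hx] <;> split_ifs <;> rfl

-- once the flag is true, A just adds each element plus one per zero
theorem gstep_true (l : List Int) (ans : Int) :
    l.foldl gstep (ans, true) = (ans + l.sum + l.count 0, true) := by
  induction l generalizing ans with
  | nil => simp
  | cons x xs ih =>
    by_cases hx : x = 0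
    · subst hx; simp [gstep, ih]; ring
    · simp [gstep, hx, ih]; ring

-- with the flag still false, A's accumulator ends at B's value of the list
theorem gstep_false (l : List Int) (ans : Int) :
    (l.foldl gstep (ans, false)).1 = ans + bval l := by
  induction l generalizing ans with
  | nil => simp [bval, stripZeros]
  | cons x xs ih =>
    by_cases hx : x = 0
    · subst hx
      simpa [gstep, bval, stripZeros] using ih ans
    · simp [gstep, hx, bval, stripZeros, gstep_true]
      ring

-- the range and the slice both reduce to the same take
theorem pyRange_toNat (n : Int) :
    PySem.List.pyRange 0 (n - 1) 1 = PySem.List.pyRange 0 (((n - 1).toNat : Nat) : Int) 1 := by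
  by_cases h : 1 ≤ n
  · rw [Int.toNat_of_nonneg (by omega)]
  · rw [PySem.List.pyRange_one_eq_nil (by omega), PySem.List.pyRange_one_eq_nil (by omega)]

-- ===== VERDICT (by name: the statement is the Claim_ definition above) =====
theorem solve_spec : Claim_equal_solve := by
  intro a n _ hpre
  unfold Pre_solve at hpre
  unfold Spec_solve solve solve_alt
  have hmax : max (n - 1) 0 = (((n - 1).toNat : Nat) : Int) := by omega
  have hm : (n - 1).toNat ≤ a.length := by omega
  rw [pyRange_toNat, solve_fold_take a _ hm, hmax, PySem.List.slice_to_natCast]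
  show (List.foldl gstep (0, false) (a.take (n - 1).toNat)).1 = _
  rw [gstep_false, zero_add]
  rfl
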